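-- pv_equiv track=rewrite | github.com/AlwafiA/CP125-Class-Repo | labs/lab05/exercise3/exercise3.py | find_bottleneck_index
-- ===== SOURCE A (Python) =====
-- def find_bottleneck_index(traceroute):
--     biggest_jump = 0
--     bottleneck_index = 0
--     for i in range(len(traceroute)-1):
--         x1, y1 = traceroute[i]
--         x2, y2 = traceroute[i + 1]
--         if  y2 > y1:
--             jump = abs(y2-y1)
--             if jump > biggest_jump:
--                 biggest_jump = jump
--                 bottleneck_index = i
--
--     return bottleneck_index
-- ===== SOURCE B (Python) =====
-- def find_bottleneck_index(traceroute):
--     diffs = [b[1] - a[1] for a, b in zip(traceroute, traceroute[1:])]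
--     if not diffs:
--         return 0
--     m = max(diffs)
--     return diffs.index(m) if m > 0 else 0
-- ===== Notes on version B (the rewrite author's own statement) =====
-- stated objective: alternative
-- what changed: B first builds the table of consecutive second-coordinate differences with zip, then uses max() and list.index() to return the first index of the maximal difference (0 when no difference is positive), instead of A's single indexed loop maintaining a running best jump and its index.
import Mathlib
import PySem

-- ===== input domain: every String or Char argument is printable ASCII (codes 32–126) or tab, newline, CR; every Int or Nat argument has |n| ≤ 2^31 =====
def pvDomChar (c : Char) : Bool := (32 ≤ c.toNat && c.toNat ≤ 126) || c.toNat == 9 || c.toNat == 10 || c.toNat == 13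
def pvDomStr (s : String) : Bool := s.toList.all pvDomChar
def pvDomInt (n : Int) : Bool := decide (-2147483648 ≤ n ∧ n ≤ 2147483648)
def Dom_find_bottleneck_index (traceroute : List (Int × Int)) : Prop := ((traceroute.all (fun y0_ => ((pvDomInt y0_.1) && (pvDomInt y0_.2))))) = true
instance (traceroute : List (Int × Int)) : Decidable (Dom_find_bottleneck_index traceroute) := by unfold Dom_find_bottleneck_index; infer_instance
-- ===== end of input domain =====

-- B replaces A's single indexed loop (running best jump + index) by a diff table built with zip,
-- then max()/list.index() with a 0 fallback when no difference is positive; alternative decomposition, same cost.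

-- ===== PORT A =====
def find_bottleneck_index (traceroute : List (Int × Int)) : Int :=
  -- for i in range(len(traceroute)-1): …  — i is always a valid index here, so pyGetD is exact
  (((PySem.List.pyRange 0 (PySem.List.len traceroute - 1) 1).foldl
    (fun (s : Int × Int) i =>
      let p1 := PySem.List.pyGetD traceroute i (0, 0)
      let p2 := PySem.List.pyGetD traceroute (i + 1) (0, 0)
      if p2.2 > p1.2 then
        (if |p2.2 - p1.2| > s.1 then (|p2.2 - p1.2|, i) else s)
      else s)
    (0, 0)) : Int × Int).2

-- ===== PORT B =====
def find_bottleneck_index_alt (traceroute : List (Int × Int)) : Int :=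
  -- diffs = [b[1] - a[1] for a, b in zip(traceroute, traceroute[1:])]  (traceroute[1:] = drop 1, exact)
  let diffs := (traceroute.zip (traceroute.drop 1)).map (fun p => p.2.2 - p.1.2)
  match PySem.List.max? diffs (fun y => y) with
  | none => 0                                   -- if not diffs: return 0
  | some m =>
    if m > 0 then (((PySem.List.index? diffs m).getD 0 : Nat) : Int)  -- m = max(diffs) ∈ diffs, so index? is some
    else 0

-- ===== PRECONDITION & SPEC =====
def Spec_find_bottleneck_index (traceroute : List (Int × Int)) (out : Int) : Prop := out = find_bottleneck_index_alt traceroute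
instance (traceroute : List (Int × Int)) (out : Int) : Decidable (Spec_find_bottleneck_index traceroute out) := by unfold Spec_find_bottleneck_index; infer_instance

-- ===== CLAIM (what is proved, stated in full; the proofs are below) =====
def Claim_equal_find_bottleneck_index : Prop := ∀ (traceroute : List (Int × Int)), Dom_find_bottleneck_index traceroute → Spec_find_bottleneck_index traceroute (find_bottleneck_index traceroute)

-- ===== LEMMAS AND PROOFS =====

-- max is left-commutative over foldl: pulling an element out of the initial accumulator
lemma foldl_max_init (l : List Int) : ∀ (a b : Int), l.foldl max (max a b) = max a (l.foldl max b) := by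
  induction l with
  | nil => intro a b; rfl
  | cons d t ih =>
    intro a b
    simp only [List.foldl_cons, max_assoc]
    exact ih a (max b d)

-- the characterisation of A's loop over the enumerated zip pairs
lemma loopA_char (us : List ((Int × Int) × (Int × Int))) :
    ∀ (a bj bi : Int), 0 ≤ bj →
    (PySem.List.enumerate us a).foldl
      (fun (s : Int × Int) p =>
        if p.2.2.2 > p.2.1.2 then
          (if |p.2.2.2 - p.2.1.2| > s.1 then (|p.2.2.2 - p.2.1.2|, p.1) else s)
        else s) (bj, bi)
    = (if (us.map (fun q => q.2.2 - q.1.2)).foldl max bj > bj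
       then ((us.map (fun q => q.2.2 - q.1.2)).foldl max bj,
             a + (((PySem.List.index? (us.map (fun q => q.2.2 - q.1.2))
                     ((us.map (fun q => q.2.2 - q.1.2)).foldl max bj)).getD 0 : Nat) : Int))
       else (bj, bi)) := by
  induction us with
  | nil =>
    intro a bj bi _
    simp [PySem.List.enumerate_nil]
  | cons q rest ih =>
    intro a bj bi hbj
    rw [PySem.List.enumerate_cons]
    set d := q.2.2 - q.1.2 with hd
    by_cases hgt : d > bj
    · -- the head updates the state to (d, a)
      have hstep : (if q.2.2 > q.1.2 then (if |q.2.2 - q.1.2| > bj then (|q.2.2 - q.1.2|, a) else (bj, bi)) else (bj, bi)) = (d, a) := by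
        have hpos : q.2.2 > q.1.2 := by omega
        have habs : |q.2.2 - q.1.2| = d := abs_of_pos (by omega)
        simp [hpos, habs, hgt]
      simp only [List.foldl_cons, hstep]
      rw [ih (a + 1) d a (le_of_lt (lt_of_le_of_lt hbj hgt))]
      have hmax : max bj d = d := max_eq_right (le_of_lt hgt)
      set M := (rest.map (fun q => q.2.2 - q.1.2)).foldl max d with hM
      have hdM : d ≤ M := (PySem.List.le_foldl_max (rest.map (fun q => q.2.2 - q.1.2)) d).1
      have houter : (List.map (fun q => q.2.2 - q.1.2) (q :: rest)).foldl max bj = M := by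
        simp only [List.map_cons, List.foldl_cons, hmax, ← hd, hM]
      rw [houter]
      have hMbj : M > bj := lt_of_lt_of_le hgt hdM
      by_cases hMd : M > d
      · -- max is strictly later: index shifts by one
        have hne : d ≠ M := by omega
        have hmem : M ∈ rest.map (fun q => q.2.2 - q.1.2) := by
          rcases PySem.List.foldl_max_mem (rest.map (fun q => q.2.2 - q.1.2)) d with h | h
          · omega
          · exact h
        rcases (PySem.List.index?_isSome_iff (rest.map (fun q => q.2.2 - q.1.2)) M).mpr hmem
          |> Option.isSome_iff_exists.mp with ⟨k, hk⟩
        rw [if_pos hMd, if_pos hMbj]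
        simp only [List.map_cons, PySem.List.index?_cons_of_ne _ hne, ← hd, hk]
        simp only [Option.map_some, Option.getD_some]
        simp only [Prod.mk.injEq, true_and]
        push_cast
        ring
      · -- head is the max: index is 0
        have hMeq : M = d := le_antisymm (by omega) hdM
        rw [if_neg hMd, if_pos hMbj, hMeq]
        simp only [List.map_cons, ← hd, PySem.List.index?_cons_self]
        simp
    · -- the head does not update the state
      have hstep : (if q.2.2 > q.1.2 then (if |q.2.2 - q.1.2| > bj then (|q.2.2 - q.1.2|, a) else (bj, bi)) else (bj, bi)) = (bj, bi) := by
        by_cases hpos : q.2.2 > q.1.2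
        · have habs : |q.2.2 - q.1.2| = d := abs_of_pos (by omega)
          have : ¬ (|q.2.2 - q.1.2| > bj) := by omega
          simp [hpos, this]
        · simp [hpos]
      simp only [List.foldl_cons, hstep]
      rw [ih (a + 1) bj bi hbj]
      have hmax : max bj d = bj := max_eq_left (by omega)
      set M := (rest.map (fun q => q.2.2 - q.1.2)).foldl max bj with hM
      have houter : (List.map (fun q => q.2.2 - q.1.2) (q :: rest)).foldl max bj = M := by
        simp only [List.map_cons, List.foldl_cons, hmax, ← hd, hM]
      rw [houter]
      by_cases hMbj : M > bj
      · have hne : d ≠ M := by omega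
        have hmem : M ∈ rest.map (fun q => q.2.2 - q.1.2) := by
          rcases PySem.List.foldl_max_mem (rest.map (fun q => q.2.2 - q.1.2)) bj with h | h
          · omega
          · exact h
        rcases (PySem.List.index?_isSome_iff (rest.map (fun q => q.2.2 - q.1.2)) M).mpr hmem
          |> Option.isSome_iff_exists.mp with ⟨k, hk⟩
        rw [if_pos hMbj, if_pos hMbj]
        simp only [List.map_cons, PySem.List.index?_cons_of_ne _ hne, ← hd, hk]
        simp only [Option.map_some, Option.getD_some]
        simp only [Prod.mk.injEq, true_and]
        push_cast
        ring
      · rw [if_neg hMbj, if_neg hMbj]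

-- A's range over len-1 is the range over the zipped pair list
lemma range_len_eq (t : List (Int × Int)) :
    PySem.List.pyRange 0 (PySem.List.len t - 1) 1
      = PySem.List.pyRange 0 (PySem.List.len (t.zip t.tail)) 1 := by
  cases t with
  | nil => decide
  | cons x r =>
    congr 1
    simp only [PySem.List.len_eq, List.length_zip, List.tail_cons, List.length_cons]
    push_cast
    omega

-- in-range lookups into t and t[1:] come from the zipped list
lemma pyGetD_zip_pair (t : List (Int × Int)) (i : Int) (h0 : 0 ≤ i)
    (h : i < PySem.List.len (t.zip t.tail)) :
    PySem.List.pyGetD (t.zip t.tail) i ((0,0),(0,0))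
      = (PySem.List.pyGetD t i (0,0), PySem.List.pyGetD t (i + 1) (0,0)) := by
  have hmin : (t.zip t.tail).length = min t.length t.tail.length := List.length_zip
  have ht : t.tail.length = t.length - 1 := List.length_tail
  have hi : i.toNat < (t.zip t.tail).length := by
    rw [PySem.List.len_eq] at h; omega
  have hit : i.toNat < t.length := by omega
  have hit1 : i.toNat + 1 < t.length := by omega
  rw [PySem.List.pyGetD_of_nonneg _ _ h0, PySem.List.pyGetD_of_nonneg _ _ h0,
      PySem.List.pyGetD_of_nonneg _ _ (show (0:Int) ≤ i + 1 by omega)]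
  have h1 : (i + 1).toNat = i.toNat + 1 := by omega
  rw [h1]
  simp only [List.getD_eq_getElem?_getD, List.getElem?_eq_getElem hi,
    List.getElem?_eq_getElem hit, List.getElem?_eq_getElem hit1]
  simp [List.getElem_zip, List.getElem_tail]

-- ===== VERDICT (by name: the statement is the Claim_ definition above) =====
theorem find_bottleneck_index_spec : Claim_equal_find_bottleneck_index := by
  intro t _
  unfold Spec_find_bottleneck_index find_bottleneck_index find_bottleneck_index_alt
  rw [range_len_eq]
  have hcongr :
      (PySem.List.pyRange 0 (PySem.List.len (t.zip t.tail)) 1).foldl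
        (fun (s : Int × Int) i =>
          let p1 := PySem.List.pyGetD t i (0, 0)
          let p2 := PySem.List.pyGetD t (i + 1) (0, 0)
          if p2.2 > p1.2 then
            (if |p2.2 - p1.2| > s.1 then (|p2.2 - p1.2|, i) else s)
          else s) (0, 0)
      = (PySem.List.pyRange 0 (PySem.List.len (t.zip t.tail)) 1).foldl
          (fun (s : Int × Int) i =>
            (fun (s : Int × Int) (p : Int × ((Int × Int) × (Int × Int))) =>
              if p.2.2.2 > p.2.1.2 then
                (if |p.2.2.2 - p.2.1.2| > s.1 then (|p.2.2.2 - p.2.1.2|, p.1) else s)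
              else s) s (i, PySem.List.pyGetD (t.zip t.tail) i ((0,0),(0,0)))) (0, 0) := by
    apply PySem.List.foldl_congr_mem
    intro s i hi
    rw [PySem.List.mem_pyRange_one] at hi
    rw [pyGetD_zip_pair t i hi.1 hi.2]
  rw [hcongr]
  rw [show (PySem.List.pyRange 0 (PySem.List.len (t.zip t.tail)) 1).foldl
        (fun (s : Int × Int) i =>
          (fun (s : Int × Int) (p : Int × ((Int × Int) × (Int × Int))) =>
            if p.2.2.2 > p.2.1.2 then
              (if |p.2.2.2 - p.2.1.2| > s.1 then (|p.2.2.2 - p.2.1.2|, p.1) else s)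
            else s) s (i, PySem.List.pyGetD (t.zip t.tail) i ((0,0),(0,0)))) (0, 0)
      = (PySem.List.enumerate (t.zip t.tail) 0).foldl
          (fun (s : Int × Int) (p : Int × ((Int × Int) × (Int × Int))) =>
            if p.2.2.2 > p.2.1.2 then
              (if |p.2.2.2 - p.2.1.2| > s.1 then (|p.2.2.2 - p.2.1.2|, p.1) else s)
            else s) (0, 0) from by
        rw [PySem.List.enumerate_eq_map_pyRange (t.zip t.tail) ((0,0),(0,0)), List.foldl_map]]
  rw [loopA_char (t.zip t.tail) 0 0 0 le_rfl]
  rw [← List.drop_one]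
  set ds := (t.zip (t.drop 1)).map (fun q => q.2.2 - q.1.2) with hds
  cases hcase : ds with
  | nil => simp [PySem.List.max?]
  | cons d rest =>
    simp only [PySem.List.max?_id_cons]
    have hfold : (d :: rest).foldl max 0 = max 0 (rest.foldl max d) := by
      simp only [List.foldl_cons]
      rw [show max 0 d = max 0 (max 0 d) by omega]
      rw [foldl_max_init, foldl_max_init]
      omega
    set m := rest.foldl max d with hm
    rw [hfold]
    by_cases hmpos : m > 0
    · have h1 : max 0 m > 0 := by omega
      have h2 : max 0 m = m := by omega
      rw [if_pos h1, if_pos hmpos, h2]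
      simp
    · have h1 : ¬ (max 0 m > 0) := by omega
      rw [if_neg h1, if_neg hmpos]
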